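-- pv_equiv track=rewrite | github.com/ABernard27/Stage-Crowdsourcing | Code/annex_def.py | worker_json
-- ===== SOURCE A (Python) =====
-- def worker_json(answers):
--     """
--     Generate a dictionary that organizes worker answers by task and worker.
--
--     Parameters:
--     - answers (dict): A dictionary containing worker answers for each task.
--
--     Returns:
--     - w_answer (dict): A dictionary that organizes worker answers by task\
--           and worker.
--     """
--     w_answer = {}
--     for task, dict in answers.items():
--         for worker, classes in dict.items():
--             if worker in w_answer:
--                 w_answer[worker][task] = classes
--             else:
--                 w_answer[worker] = {}
--                 w_answer[worker][task] = classes
--     return w_answer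
-- ===== SOURCE B (Python) =====
-- def worker_json(answers):
--     """Transpose answers (task -> worker -> class) into (worker -> task -> class),
--     built worker-major: gather workers first, then one comprehension per worker."""
--     workers = dict.fromkeys(w for d in answers.values() for w in d)
--     return {w: {t: d[w] for t, d in answers.items() if w in d}
--             for w in workers}
-- ===== Notes on version B (the rewrite author's own statement) =====
-- stated objective: simpler
-- what changed: Instead of a single task-major pass that grows/updates nested dicts with an existence branch, B first gathers the distinct workers (dict.fromkeys over all inner dicts) and then builds the result worker-major as one nested comprehension filtering tasks per worker.
import Mathlib
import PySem

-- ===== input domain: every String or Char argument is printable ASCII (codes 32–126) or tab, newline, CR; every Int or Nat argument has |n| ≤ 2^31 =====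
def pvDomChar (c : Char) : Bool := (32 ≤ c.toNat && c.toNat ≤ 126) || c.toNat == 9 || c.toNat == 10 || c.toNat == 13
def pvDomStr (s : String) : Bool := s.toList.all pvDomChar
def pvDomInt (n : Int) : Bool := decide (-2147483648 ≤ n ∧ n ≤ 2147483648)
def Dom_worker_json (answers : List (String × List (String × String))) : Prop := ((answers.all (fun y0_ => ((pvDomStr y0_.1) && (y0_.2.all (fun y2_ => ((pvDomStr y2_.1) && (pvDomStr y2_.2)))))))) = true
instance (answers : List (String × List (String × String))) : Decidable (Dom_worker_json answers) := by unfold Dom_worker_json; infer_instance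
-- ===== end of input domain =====

-- B builds the transposed dict worker-major (gather workers, then one comprehension per worker)
-- instead of A's task-major single pass updating nested dicts; objective: simpler.

-- ===== PORT A =====
-- inner loop body: 'for worker, classes in dict.items(): if worker in w_answer: … else: …'
def pvStepA (task : String) (w : PySem.Dict String (PySem.Dict String String))
    (wc : String × String) : PySem.Dict String (PySem.Dict String String) :=
  if w.contains wc.1 then
    -- w_answer[worker][task] = classes
    w.modify wc.1 PySem.Dict.empty (fun inner => inner.insert task wc.2)
  else
    -- w_answer[worker] = {}; w_answer[worker][task] = classes
    (w.insert wc.1 PySem.Dict.empty).insert wc.1 (PySem.Dict.empty.insert task wc.2)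

def worker_json (answers : List (String × List (String × String))) :
    List (String × List (String × String)) :=
  ((answers.foldl (fun w td => td.2.foldl (pvStepA td.1) w)
      (PySem.Dict.empty : PySem.Dict String (PySem.Dict String String))).items).map
    (fun p => (p.1, p.2.items))

-- ===== PORT B =====
def worker_json_alt (answers : List (String × List (String × String))) :
    List (String × List (String × String)) :=
  -- workers = dict.fromkeys(w for d in answers.values() for w in d)
  let workers := PySem.List.dedup ((answers.map Prod.snd).flatMap (List.map Prod.fst))
  -- {w: {t: d[w] for t, d in answers.items() if w in d} for w in workers}
  workers.map (fun w =>
    (w, (answers.filter (fun td => td.2.any (fun p => p.1 == w))).map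
          (fun td => (td.1, (List.lookup w td.2).getD ""))))

-- ===== PRECONDITION & SPEC =====
-- Pre_ excludes association lists with a duplicate task key or a duplicate worker key inside a
-- task: a Python dict cannot contain duplicate keys, so these Lean values model no Python input.
def Pre_worker_json (answers : List (String × List (String × String))) : Prop :=
  (answers.map Prod.fst).Nodup ∧ ∀ td ∈ answers, (td.2.map Prod.fst).Nodup
instance (answers : List (String × List (String × String))) : Decidable (Pre_worker_json answers) := by
  unfold Pre_worker_json; infer_instance

def pvWitness_worker_json : (List (String × List (String × String))) :=
  [("t1", [("w1", "cat"), ("w2", "dog")]), ("t2", [("w2", "cat")])]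

def Spec_worker_json (answers : List (String × List (String × String)))
    (out : List (String × List (String × String))) : Prop := out = worker_json_alt answers
instance (answers : List (String × List (String × String))) (out : List (String × List (String × String))) : Decidable (Spec_worker_json answers out) := by
  unfold Spec_worker_json; infer_instance

-- ===== CLAIM (what is proved, stated in full; the proofs are below) =====
def Claim_equal_worker_json : Prop := ∀ (answers : List (String × List (String × String))), Dom_worker_json answers → Pre_worker_json answers → Spec_worker_json answers (worker_json answers)

-- ===== LEMMAS AND PROOFS =====
theorem pvStepA_getD_self (t : String) (w : PySem.Dict String (PySem.Dict String String))
    (v c : String) :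
    (pvStepA t w (v, c)).getD v PySem.Dict.empty
      = (w.getD v PySem.Dict.empty).insert t c := by
  unfold pvStepA
  by_cases h : w.contains v
  · simp [h, PySem.Dict.getD_modify_self]
  · rw [if_neg (by simp [h]), PySem.Dict.insert_insert_self, PySem.Dict.getD_insert_self,
      PySem.Dict.getD_of_not_contains w _ (by simpa using h)]

theorem pvStepA_getD_ne (t : String) (w : PySem.Dict String (PySem.Dict String String))
    (k c v : String) (h : v ≠ k) :
    (pvStepA t w (k, c)).getD v PySem.Dict.empty = w.getD v PySem.Dict.empty := by
  unfold pvStepA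
  by_cases hc : w.contains k
  · simp [hc, PySem.Dict.getD_modify_of_ne _ _ _ h]
  · simp [hc, PySem.Dict.insert_insert_self, PySem.Dict.getD_insert_of_ne _ _ _ h]

theorem pvStepA_keys (t : String) (w : PySem.Dict String (PySem.Dict String String))
    (k c : String) :
    (pvStepA t w (k, c)).keys = PySem.Set.add w.keys k := by
  unfold pvStepA
  by_cases hc : w.contains k
  · have hk : k ∈ w.keys := (PySem.Dict.contains_iff_mem_keys w k).mp hc
    simp [hc, PySem.Dict.keys_modify, PySem.Dict.keys_insert_of_contains,
      PySem.Set.add, hk, PySem.Set.contains, ]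
  · have hk : k ∉ w.keys := fun hm => hc ((PySem.Dict.contains_iff_mem_keys w k).mpr hm)
    simp [hc, PySem.Dict.insert_insert_self, PySem.Dict.keys_insert_of_not_contains,
      PySem.Set.add, hk, PySem.Set.contains, ]
theorem foldA_keys (t : String) (d : List (String × String))
    (w : PySem.Dict String (PySem.Dict String String)) :
    (d.foldl (pvStepA t) w).keys = PySem.Set.update w.keys (d.map Prod.fst) := by
  induction d generalizing w with
  | nil => simp [PySem.Set.update]
  | cons p rest ih =>
    obtain ⟨k, c⟩ := p
    simp only [List.foldl_cons, List.map_cons, PySem.Set.update, ih, pvStepA_keys]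

theorem foldA_getD (t : String) (d : List (String × String))
    (hd : (d.map Prod.fst).Nodup) (w : PySem.Dict String (PySem.Dict String String))
    (v : String) :
    (d.foldl (pvStepA t) w).getD v PySem.Dict.empty =
      if d.any (fun p => p.1 == v) then
        (w.getD v PySem.Dict.empty).insert t ((List.lookup v d).getD "")
      else w.getD v PySem.Dict.empty := by
  induction d generalizing w with
  | nil => simp
  | cons p rest ih =>
    obtain ⟨k, c⟩ := p
    simp only [List.map_cons, List.nodup_cons] at hd
    by_cases hkv : k = v
    · subst hkv
      have hrest : rest.any (fun p => p.1 == k) = false := by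
        simp only [List.any_eq_false]
        intro p hp hbe
        exact hd.1 (by simpa [← (beq_iff_eq).mp hbe] using List.mem_map_of_mem (f := Prod.fst) hp)
      simp only [List.foldl_cons, ih hd.2, hrest, List.any_cons, beq_self_eq_true,
        Bool.true_or, if_true, List.lookup_cons_self, Option.getD_some, pvStepA_getD_self]
      rw [if_neg (by simp)]
    · simp only [List.foldl_cons, ih hd.2, List.any_cons,
        pvStepA_getD_ne t w k c v (Ne.symm hkv)]
      have h1 : (k == v) = false := by simp [hkv]
      have h2 : (v == k) = false := by simp [Ne.symm hkv]
      simp only [h1, Bool.false_or, List.lookup_cons, h2]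
theorem outer_inv (answers : List (String × List (String × String)))
    (h1 : (answers.map Prod.fst).Nodup)
    (h2 : ∀ td ∈ answers, (td.2.map Prod.fst).Nodup) :
    (answers.foldl (fun w td => td.2.foldl (pvStepA td.1) w)
        (PySem.Dict.empty : PySem.Dict String (PySem.Dict String String))).keys
      = PySem.List.dedup ((answers.map Prod.snd).flatMap (List.map Prod.fst)) ∧
    ∀ v, ((answers.foldl (fun w td => td.2.foldl (pvStepA td.1) w)
        (PySem.Dict.empty : PySem.Dict String (PySem.Dict String String))).getD v
          PySem.Dict.empty).items
      = (answers.filter (fun td => td.2.any (fun p => p.1 == v))).map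
          (fun td => (td.1, (List.lookup v td.2).getD "")) := by
  induction answers using List.reverseRecOn with
  | nil =>
    refine ⟨by simp [PySem.List.dedup, PySem.Set.ofList], fun v => ?_⟩
    rw [List.foldl_nil, List.filter_nil, List.map_nil, PySem.Dict.getD_empty]; rfl
  | append_singleton pre td ihp =>
    obtain ⟨t, d⟩ := td
    simp only [List.map_append, List.map_cons, List.map_nil] at h1
    have hpre1 : (pre.map Prod.fst).Nodup := (List.nodup_append.mp h1).1
    have htpre : t ∉ pre.map Prod.fst := by
      have := (List.nodup_append.mp h1).2.2
      intro hm; exact this t hm t (by simp) rfl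
    obtain ⟨ihk, ihg⟩ := ihp hpre1 (fun x hx => h2 x (List.mem_append_left _ hx))
    have hd : (d.map Prod.fst).Nodup := h2 (t, d) (by simp)
    constructor
    · rw [List.foldl_append, List.foldl_cons, List.foldl_nil, foldA_keys, ihk]
      simp only [PySem.List.dedup_eq_ofList, PySem.Set.ofList_eq_foldl, List.map_append,
        List.flatMap_append, List.foldl_append, PySem.Set.update]
      simp
    · intro v
      rw [List.foldl_append, List.foldl_cons, List.foldl_nil, foldA_getD t d hd]
      by_cases hv : d.any (fun p => p.1 == v)
      · rw [if_pos hv]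
        have hcont : ((pre.foldl (fun w td => td.2.foldl (pvStepA td.1) w)
            (PySem.Dict.empty : PySem.Dict String (PySem.Dict String String))).getD v
              PySem.Dict.empty).contains t = false := by
          rw [PySem.Dict.contains_eq_decide_mem_keys, decide_eq_false_iff_not]
          intro hm
          apply htpre
          have : t ∈ ((pre.foldl (fun w td => td.2.foldl (pvStepA td.1) w)
              (PySem.Dict.empty : PySem.Dict String (PySem.Dict String String))).getD v
                PySem.Dict.empty).items.map Prod.fst := hm
          rw [ihg v] at this
          simp only [List.map_map, List.mem_map] at this
          obtain ⟨x, hx, hfx⟩ := this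
          exact hfx ▸ List.mem_map_of_mem (List.mem_of_mem_filter hx)
        rw [PySem.Dict.items_insert_of_not_contains _ _ hcont, ihg v]
        simp [List.filter_append, hv]
      · rw [if_neg hv, ihg v]
        simp [List.filter_append, hv]
theorem worker_json_spec' : ∀ (answers : List (String × List (String × String))),
    (answers.map Prod.fst).Nodup → (∀ td ∈ answers, (td.2.map Prod.fst).Nodup) →
    worker_json answers = worker_json_alt answers := by
  intro answers h1 h2
  obtain ⟨hk, hg⟩ := outer_inv answers h1 h2
  have hnd : (answers.foldl (fun w td => td.2.foldl (pvStepA td.1) w)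
      (PySem.Dict.empty : PySem.Dict String (PySem.Dict String String))).keys.Nodup := by
    rw [hk]; exact PySem.List.nodup_dedup _
  unfold worker_json worker_json_alt
  rw [PySem.Dict.items_eq_map_keys _ hnd PySem.Dict.empty, List.map_map, hk]
  exact List.map_congr_left (fun w _ => by simp [hg w])

-- ===== VERDICT (by name: the statement is the Claim_ definition above) =====
theorem worker_json_spec : Claim_equal_worker_json := by
  intro answers _hdom hpre
  exact worker_json_spec' answers hpre.1 hpre.2
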